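-- pv_equiv track=rewrite | github.com/manshi137/K-Map-Minimised-SOP- | 2020CS50438_2020CS50429_assignment_3.py | findexpterm
-- ===== SOURCE A (Python) =====
-- def findexpterm(term, allterms):
--     nones =  term.count('-')
--     if nones ==0:
--         if term in allterms:
--             return [term]
--         else:
--             return []
--     else:
--         ind= term.find('-')
--         ans = []
--         if(ind!=-1):
--             term1= term[:ind]+'1'+ term[ind+1:]
--             term2= term[:ind]+'0'+ term[ind+1:]
--             ans1 = findexpterm(term1, allterms)
--             ans2 = findexpterm(term2, allterms)
--             ans+=ans1
--             ans+=ans2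
--         return ans
-- ===== SOURCE B (Python) =====
-- def findexpterm(term, allterms):
--     # One pass over allterms: keep the distinct terms that are an expansion of
--     # `term` ('-' positions become '0' or '1', everything else must match);
--     # A's DFS emission order ('1' branch before '0' branch at the leftmost '-')
--     # is exactly descending lexicographic order on the matching strings, since
--     # all matches agree on the non-'-' positions.
--     n = len(term)
--     seen = set()
--     cands = []
--     for t in allterms:
--         if t in seen:
--             continue
--         if len(t) == n and all((c == '0' or c == '1') if p == '-' else (c == p)
--                                for p, c in zip(term, t)):
--             seen.add(t)
--             cands.append(t)
--     cands.sort(reverse=True)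
--     return cands
-- ===== Notes on version B (the rewrite author's own statement) =====
-- stated objective: alternative
-- what changed: A expands every '-' recursively into 2^k candidate strings and probes each against allterms; B makes one pattern-matching pass over allterms keeping the distinct matches and then sorts them in descending string order, which is exactly A's DFS emission order ('1' branch before '0' at the leftmost '-').
import Mathlib
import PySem

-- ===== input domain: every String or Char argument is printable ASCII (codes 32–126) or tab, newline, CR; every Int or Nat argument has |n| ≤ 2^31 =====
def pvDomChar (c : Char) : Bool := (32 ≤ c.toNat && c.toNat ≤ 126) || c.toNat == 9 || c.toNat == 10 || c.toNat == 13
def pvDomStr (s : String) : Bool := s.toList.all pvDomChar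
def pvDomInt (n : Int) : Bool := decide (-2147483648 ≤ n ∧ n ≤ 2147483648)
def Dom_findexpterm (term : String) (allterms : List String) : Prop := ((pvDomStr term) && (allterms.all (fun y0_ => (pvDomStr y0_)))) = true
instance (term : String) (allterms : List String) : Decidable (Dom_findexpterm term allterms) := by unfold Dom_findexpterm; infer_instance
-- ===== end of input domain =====

-- B replaces A's recursive DFS expansion of the '-' positions (2^k candidate
-- strings, each probed against allterms) by one pattern-match pass over allterms
-- followed by a descending sort (A's DFS emission order IS descending string
-- order on the matches); objective: alternative algorithm, same result.

-- ===== PORT A =====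
-- (the next three lemmas are cited by the port's decreasing_by: A recurses on a
--  string with one '-' replaced, and its '-'-count drops by one)
lemma countgo_char (c : Char) : ∀ fuel cs acc, cs.length ≤ fuel →
    PySem.Chars.count.go [c] fuel cs acc = acc + cs.count c := by
  intro fuel
  induction fuel with
  | zero => intro cs acc h; cases cs with
    | nil => simp [PySem.Chars.count.go]
    | cons a t => simp at h
  | succ n ih =>
    intro cs acc h
    cases cs with
    | nil => simp [PySem.Chars.count.go]
    | cons a t =>
      simp only [PySem.Chars.count.go]
      by_cases hac : a = c
      · subst hac
        rw [if_pos (by simp [List.isPrefixOf])]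
        simp only [List.length_singleton, List.drop_one, List.tail_cons]
        rw [ih t (acc+1) (by simpa using h)]
        simp; omega
      · rw [if_neg (by simp [List.isPrefixOf]; exact fun hh => hac hh.symm)]
        rw [ih t acc (by simpa using h)]
        simp [List.count_cons, hac]

lemma countChar_eq (cs : List Char) (c : Char) : PySem.Chars.count cs [c] = cs.count c := by
  simp [PySem.Chars.count, countgo_char c cs.length cs 0 le_rfl]

lemma find_char_structure (cs : List Char) (c : Char) (h : c ∈ cs) :
    ∃ pre suf, PySem.Chars.find cs [c] = (pre.length : Int) ∧ cs = pre ++ c :: suf ∧ pre.count c = 0 := by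
  have hinf : [c] <:+: cs := by
    rcases List.mem_iff_append.mp h with ⟨pre, suf, rfl⟩
    exact ⟨pre, suf, by simp⟩
  have hnn : 0 ≤ PySem.Chars.find cs [c] := (PySem.Chars.find_nonneg_iff cs [c]).mpr hinf
  obtain ⟨hpref, hmin⟩ := PySem.Chars.find_spec hnn
  set j := (PySem.Chars.find cs [c]).toNat with hj
  obtain ⟨t, ht⟩ := hpref
  have hjlt : j < cs.length := by
    have : (([c] : List Char) ++ t).length = (cs.drop j).length := by rw [ht]
    simp at this; omega
  have h2 : cs.drop (j+1) = t := by
    have := congrArg (List.drop 1) ht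
    simpa [List.drop_drop, Nat.add_comm] using this.symm
  have h1 : cs.drop j = c :: cs.drop (j+1) := by rw [h2, ← ht]; rfl
  refine ⟨cs.take j, cs.drop (j+1), ?_, ?_, ?_⟩
  · rw [List.length_take, min_eq_left (le_of_lt hjlt)]; omega
  · conv_lhs => rw [← List.take_append_drop j cs, h1]
  · rw [List.count_eq_zero]
    intro hc
    obtain ⟨i, hi, hgi⟩ := List.getElem_of_mem hc
    rw [List.length_take] at hi
    have hij : i < j := lt_of_lt_of_le hi (min_le_left _ _)
    have hil : i < cs.length := lt_of_lt_of_le hi (min_le_right _ _)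
    refine hmin i hij ?_
    rw [List.getElem_take] at hgi
    rw [List.drop_eq_getElem_cons hil, hgi]
    exact ⟨cs.drop (i+1), rfl⟩

lemma subst_toList (term : String) (pre suf : List Char) (c x : Char)
    (hsplit : term.toList = pre ++ c :: suf) :
    (PySem.Str.slice term none (some (pre.length : Int)) ++ String.singleton x ++
      PySem.Str.slice term (some ((pre.length : Int) + 1)) none).toList = pre ++ x :: suf := by
  simp [PySem.Str.slice, hsplit, PySem.List.slice_to_natCast]
  rw [show ((pre.length : Int) + 1) = (((pre.length + 1 : Nat)) : Int) by push_cast; ring]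
  rw [PySem.List.slice_from_natCast]
  rw [show pre ++ c :: suf = (pre ++ [c]) ++ suf by simp]
  rw [show pre.length + 1 = (pre ++ [c]).length by simp]
  rw [List.drop_left]

def findexpterm (term : String) (allterms : List String) : List String :=
  let nones := PySem.Str.count term "-"
  if h0 : nones = 0 then
    if term ∈ allterms then [term] else []
  else
    let ind := PySem.Str.find term "-"
    if ind ≠ -1 then
      let term1 := PySem.Str.slice term none (some ind) ++ "1" ++ PySem.Str.slice term (some (ind + 1)) none
      let term2 := PySem.Str.slice term none (some ind) ++ "0" ++ PySem.Str.slice term (some (ind + 1)) none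
      findexpterm term1 allterms ++ findexpterm term2 allterms
    else []
termination_by term.toList.count '-'
decreasing_by
  all_goals {
    have hb : PySem.Str.count term "-" = term.toList.count '-' := by
      rw [PySem.Str.count_eq, show "-".toList = ['-'] from rfl, countChar_eq]
    have hc : term.toList.count '-' ≠ 0 := fun hz => h0 (hb.trans hz)
    have hmem : '-' ∈ term.toList := List.count_pos_iff.mp (Nat.pos_of_ne_zero hc)
    obtain ⟨pre, suf, hfind, hsplit, hpre0⟩ := find_char_structure term.toList '-' hmem
    have hfind' : PySem.Str.find term "-" = (pre.length : Int) := by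
      rw [PySem.Str.find_eq, show "-".toList = ['-'] from rfl]; exact hfind
    rw [hfind']
    first
      | rw [show ("1" : String) = String.singleton '1' from rfl]
      | rw [show ("0" : String) = String.singleton '0' from rfl]
    rw [subst_toList term pre suf '-' _ hsplit]
    rw [hsplit]
    simp [List.count_append, List.count_cons]
  }

-- ===== PORT B =====
-- Source B's `matches(t)`: length check plus per-position check over zip(term, t)
def pyMatches (term t : String) : Bool :=
  (PySem.Str.len t == PySem.Str.len term) &&
  (term.toList.zip t.toList).all (fun pc =>
    if pc.1 = '-' then pc.2 == '0' || pc.2 == '1' else pc.2 == pc.1)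

-- Source B's loop body: skip seen terms (the `seen` set holds exactly the members of
-- `cands`), append fresh matches
def altStep (term : String) (cands : List String) (t : String) : List String :=
  if t ∈ cands then cands
  else if pyMatches term t then cands ++ [t] else cands

def findexpterm_alt (term : String) (allterms : List String) : List String :=
  let cands := allterms.foldl (altStep term) []
  PySem.List.sorted cands (fun t => t) true

-- ===== PRECONDITION & SPEC =====
def Spec_findexpterm (term : String) (allterms : List String) (out : List String) : Prop := out = findexpterm_alt term allterms
instance (term : String) (allterms : List String) (out : List String) : Decidable (Spec_findexpterm term allterms out) := by unfold Spec_findexpterm; infer_instance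

-- ===== CLAIM (what is proved, stated in full; the proofs are below) =====
def Claim_equal_findexpterm : Prop := ∀ (term : String) (allterms : List String), Dom_findexpterm term allterms → Spec_findexpterm term allterms (findexpterm term allterms)

-- ===== LEMMAS AND PROOFS =====
def mtchL (pat u : List Char) : Bool :=
  (u.length == pat.length) &&
  (pat.zip u).all (fun pc =>
    if pc.1 = '-' then pc.2 == '0' || pc.2 == '1' else pc.2 == pc.1)

lemma pyMatches_eq (term t : String) : pyMatches term t = mtchL term.toList t.toList := by
  simp only [pyMatches, mtchL, PySem.Str.len_eq]
  by_cases h : t.toList.length = term.toList.length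
  · simp [h]
  · rw [beq_eq_false_iff_ne.mpr (show (t.toList.length : Int) ≠ (term.toList.length : Int) from by exact_mod_cast h),
        beq_eq_false_iff_ne.mpr h]

lemma mtch_nodash : ∀ pat u : List Char, pat.count '-' = 0 → (mtchL pat u = true ↔ u = pat) := by
  intro pat
  induction pat with
  | nil => intro u _; cases u <;> simp [mtchL]
  | cons p ps ih =>
    intro u hc
    have hp : p ≠ '-' := by
      intro h; subst h; simp [List.count_cons] at hc
    have hps : ps.count '-' = 0 := by
      simp [List.count_cons, hp] at hc ⊢; omega
    cases u with
    | nil => simp [mtchL]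
    | cons c cs =>
      have := ih cs hps
      simp [mtchL, hp] at this ⊢
      constructor
      · rintro ⟨hlen, hcp, hall⟩
        exact ⟨hcp, (this.mp ⟨hlen, hall⟩)⟩
      · rintro ⟨h1, h2⟩
        obtain ⟨hl, ha⟩ := this.mpr h2
        exact ⟨hl, h1, ha⟩

lemma mtch_split : ∀ pre : List Char, ∀ suf u : List Char,
    mtchL (pre ++ '-' :: suf) u = true ↔
      (mtchL (pre ++ '1' :: suf) u = true ∨ mtchL (pre ++ '0' :: suf) u = true) := by
  intro pre
  induction pre with
  | nil =>
    intro suf u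
    cases u with
    | nil => simp [mtchL]
    | cons c cs =>
      simp [mtchL]
      constructor
      · rintro ⟨hl, h01, hall⟩
        rcases h01 with h | h
        · exact Or.inr ⟨hl, h, hall⟩
        · exact Or.inl ⟨hl, h, hall⟩
      · rintro (⟨hl, h, hall⟩ | ⟨hl, h, hall⟩)
        · exact ⟨hl, Or.inr h, hall⟩
        · exact ⟨hl, Or.inl h, hall⟩
  | cons p ps ih =>
    intro suf u
    cases u with
    | nil => simp [mtchL]
    | cons c cs =>
      have := ih suf cs
      simp [mtchL] at this ⊢
      by_cases hp : p = '-'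
      · subst hp
        simp only [if_pos rfl] at *
        constructor
        · rintro ⟨hl, h01, hall⟩
          rcases (this.mp ⟨by omega, hall⟩ : _) with ⟨_, h⟩ | ⟨_, h⟩
          · exact Or.inl ⟨hl, h01, h⟩
          · exact Or.inr ⟨hl, h01, h⟩
        · rintro (⟨hl, h01, hall⟩ | ⟨hl, h01, hall⟩)
          · exact ⟨hl, h01, (this.mpr (Or.inl ⟨by omega, hall⟩)).2⟩
          · exact ⟨hl, h01, (this.mpr (Or.inr ⟨by omega, hall⟩)).2⟩
      · simp only [if_neg hp] at *
        constructor
        · rintro ⟨hl, hcp, hall⟩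
          rcases (this.mp ⟨by omega, hall⟩ : _) with ⟨_, h⟩ | ⟨_, h⟩
          · exact Or.inl ⟨hl, hcp, h⟩
          · exact Or.inr ⟨hl, hcp, h⟩
        · rintro (⟨hl, hcp, hall⟩ | ⟨hl, hcp, hall⟩)
          · exact ⟨hl, hcp, (this.mpr (Or.inl ⟨by omega, hall⟩)).2⟩
          · exact ⟨hl, hcp, (this.mpr (Or.inr ⟨by omega, hall⟩)).2⟩

lemma mtch_prefix : ∀ pre : List Char, ∀ suf u : List Char, pre.count '-' = 0 →
    mtchL (pre ++ suf) u = true → ∃ w, u = pre ++ w ∧ mtchL suf w = true := by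
  intro pre
  induction pre with
  | nil => intro suf u _ h; exact ⟨u, rfl, h⟩
  | cons p ps ih =>
    intro suf u hc h
    have hp : p ≠ '-' := by intro hh; subst hh; simp [List.count_cons] at hc
    have hps : ps.count '-' = 0 := by simp [List.count_cons, hp] at hc ⊢; omega
    cases u with
    | nil => simp [mtchL] at h
    | cons c cs =>
      simp [mtchL, hp] at h
      obtain ⟨hl, hcp, hall⟩ := h
      obtain ⟨w, hw, hm⟩ := ih suf cs hps (by simp [mtchL]; exact ⟨by omega, hall⟩)
      exact ⟨w, by simp [hw, hcp], hm⟩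

lemma lex_lt (pre : List Char) (wa wb : List Char) :
    (pre ++ '0' :: wb) < (pre ++ '1' :: wa) := by
  induction pre with
  | nil => exact List.Lex.rel (by decide)
  | cons p ps ih => exact List.Lex.cons ih

lemma B_mem (term : String) : ∀ (l : List String) (acc : List String) (x : String),
    x ∈ l.foldl (altStep term) acc ↔ x ∈ acc ∨ (x ∈ l ∧ pyMatches term x = true) := by
  intro l
  induction l with
  | nil => intro acc x; simp
  | cons t ts ih =>
    intro acc x
    simp only [List.foldl_cons, ih, altStep]
    by_cases ht : t ∈ acc
    · rw [if_pos ht]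
      constructor
      · rintro (h | h)
        · exact Or.inl h
        · exact Or.inr ⟨List.mem_cons_of_mem _ h.1, h.2⟩
      · rintro (h | ⟨hm, hp⟩)
        · exact Or.inl h
        · rcases List.mem_cons.mp hm with rfl | hm'
          · exact Or.inl ht
          · exact Or.inr ⟨hm', hp⟩
    · rw [if_neg ht]
      by_cases hp : pyMatches term t = true
      · rw [if_pos hp]
        constructor
        · rintro (h | h)
          · rcases List.mem_append.mp h with h' | h'
            · exact Or.inl h'
            · rcases List.mem_singleton.mp h' with rfl
              exact Or.inr ⟨List.mem_cons_self, hp⟩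
          · exact Or.inr ⟨List.mem_cons_of_mem _ h.1, h.2⟩
        · rintro (h | ⟨hm, hq⟩)
          · exact Or.inl (List.mem_append.mpr (Or.inl h))
          · rcases List.mem_cons.mp hm with rfl | hm'
            · exact Or.inl (List.mem_append.mpr (Or.inr (by simp)))
            · exact Or.inr ⟨hm', hq⟩
      · rw [if_neg hp]
        constructor
        · rintro (h | h)
          · exact Or.inl h
          · exact Or.inr ⟨List.mem_cons_of_mem _ h.1, h.2⟩
        · rintro (h | ⟨hm, hq⟩)
          · exact Or.inl h
          · rcases List.mem_cons.mp hm with rfl | hm'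
            · exact absurd hq hp
            · exact Or.inr ⟨hm', hq⟩

lemma B_nodup (term : String) : ∀ (l : List String) (acc : List String), acc.Nodup →
    (l.foldl (altStep term) acc).Nodup := by
  intro l
  induction l with
  | nil => intro acc h; simpa
  | cons t ts ih =>
    intro acc h
    simp only [List.foldl_cons, altStep]
    by_cases ht : t ∈ acc
    · rw [if_pos ht]; exact ih acc h
    · rw [if_neg ht]
      by_cases hp : pyMatches term t = true
      · rw [if_pos hp]
        refine ih _ ?_
        rw [show acc ++ [t] = acc.concat t from List.concat_eq_append.symm, List.nodup_concat]
        exact ⟨ht, h⟩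
      · rw [if_neg hp]; exact ih acc h

set_option maxHeartbeats 1000000 in
lemma A_char : ∀ (n : Nat) (term : String) (allterms : List String), term.toList.count '-' = n →
    (∀ x, x ∈ findexpterm term allterms ↔ (mtchL term.toList x.toList = true ∧ x ∈ allterms)) ∧
    (findexpterm term allterms).Pairwise (fun a b => b < a) := by
  intro n
  induction n with
  | zero =>
    intro term allterms h
    have hbC : PySem.Chars.count term.toList ['-'] = 0 := by rw [countChar_eq]; exact h
    have hA : findexpterm term allterms = if term ∈ allterms then [term] else [] := by
      rw [findexpterm]
      simp only [PySem.Str.count_eq, show "-".toList = ['-'] from rfl, hbC]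
      rw [dif_pos trivial]
    rw [hA]
    constructor
    · intro x
      rw [mtch_nodash term.toList x.toList h]
      constructor
      · intro hx
        by_cases hm : term ∈ allterms
        · rw [if_pos hm] at hx
          rcases List.mem_singleton.mp hx with rfl
          exact ⟨rfl, hm⟩
        · rw [if_neg hm] at hx; simp at hx
      · rintro ⟨hxe, hm⟩
        have : x = term := String.toList_inj.mp hxe
        subst this
        rw [if_pos hm]; simp
    · split_ifs <;> simp
  | succ n ih =>
    intro term allterms h
    have hbC : PySem.Chars.count term.toList ['-'] = n + 1 := by rw [countChar_eq]; exact h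
    have hmem : '-' ∈ term.toList := List.count_pos_iff.mp (by omega)
    obtain ⟨pre, suf, hfind, hsplit, hpre0⟩ := find_char_structure term.toList '-' hmem
    have hf : PySem.Str.find term "-" = (pre.length : Int) := by
      rw [PySem.Str.find_eq, show "-".toList = ['-'] from rfl]; exact hfind
    have hstep : findexpterm term allterms =
        findexpterm (PySem.Str.slice term none (some ((pre.length : Int))) ++ "1" ++
          PySem.Str.slice term (some ((pre.length : Int) + 1)) none) allterms ++
        findexpterm (PySem.Str.slice term none (some ((pre.length : Int))) ++ "0" ++
          PySem.Str.slice term (some ((pre.length : Int) + 1)) none) allterms := by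
      rw [findexpterm]
      rw [dif_neg (show ¬ PySem.Str.count term "-" = 0 by
        rw [PySem.Str.count_eq, show "-".toList = ['-'] from rfl, hbC]; exact Nat.succ_ne_zero n)]
      rw [hf]
      rw [if_pos (show (pre.length : Int) ≠ -1 by omega)]
    set t1 := PySem.Str.slice term none (some ((pre.length : Int))) ++ "1" ++
      PySem.Str.slice term (some ((pre.length : Int) + 1)) none with ht1
    set t2 := PySem.Str.slice term none (some ((pre.length : Int))) ++ "0" ++
      PySem.Str.slice term (some ((pre.length : Int) + 1)) none with ht2
    have h1l : t1.toList = pre ++ '1' :: suf := by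
      rw [ht1, show ("1" : String) = String.singleton '1' from rfl]
      exact subst_toList term pre suf '-' '1' hsplit
    have h2l : t2.toList = pre ++ '0' :: suf := by
      rw [ht2, show ("0" : String) = String.singleton '0' from rfl]
      exact subst_toList term pre suf '-' '0' hsplit
    have hsufn : suf.count '-' = n := by
      rw [hsplit] at h
      simp [List.count_append, List.count_cons, hpre0] at h
      omega
    have hc1 : t1.toList.count '-' = n := by
      rw [h1l]; simp [List.count_append, List.count_cons, hpre0, hsufn]
    have hc2 : t2.toList.count '-' = n := by
      rw [h2l]; simp [List.count_append, List.count_cons, hpre0, hsufn]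
    obtain ⟨ih1m, ih1p⟩ := ih t1 allterms hc1
    obtain ⟨ih2m, ih2p⟩ := ih t2 allterms hc2
    constructor
    · intro x
      rw [hstep]
      rw [List.mem_append, ih1m x, ih2m x, h1l, h2l, hsplit, mtch_split]
      tauto
    · rw [hstep]
      rw [List.pairwise_append]
      refine ⟨ih1p, ih2p, ?_⟩
      intro a ha b hbb
      have hma : mtchL (pre ++ '1' :: suf) a.toList = true := by
        have := (ih1m a).mp ha; rw [h1l] at this; exact this.1
      have hmb : mtchL (pre ++ '0' :: suf) b.toList = true := by
        have := (ih2m b).mp hbb; rw [h2l] at this; exact this.1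
      obtain ⟨wa, hwa, -⟩ := mtch_prefix (pre ++ ['1']) suf a.toList
        (by simp [List.count_append, hpre0]) (by simpa using hma)
      obtain ⟨wb, hwb, -⟩ := mtch_prefix (pre ++ ['0']) suf b.toList
        (by simp [List.count_append, hpre0]) (by simpa using hmb)
      rw [String.lt_iff_toList_lt, hwa, hwb]
      simpa using lex_lt pre wa wb

-- ===== VERDICT (by name: the statement is the Claim_ definition above) =====
theorem findexpterm_spec : Claim_equal_findexpterm := by
  intro term allterms _
  unfold Spec_findexpterm findexpterm_alt
  obtain ⟨hmem, hpw⟩ := A_char (term.toList.count '-') term allterms rfl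
  have hAnd : (findexpterm term allterms).Nodup :=
    (List.Pairwise.imp (fun h => ne_of_gt h) hpw)
  have hBnd : (allterms.foldl (altStep term) []).Nodup := B_nodup term allterms [] (by simp)
  have hperm : (findexpterm term allterms).Perm (allterms.foldl (altStep term) []) := by
    rw [List.perm_ext_iff_of_nodup hAnd hBnd]
    intro x
    rw [hmem x, B_mem term allterms [] x, pyMatches_eq]
    simp [and_comm]
  exact (PySem.List.sorted_rev_eq_of_perm_of_pairwise_gt _ _ _ hperm hpw).symm
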